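-- pv_equiv track=rewrite | github.com/V-rand/open_niumasearch | src/deep_research_agent/agent.py | _compact_conversation_tail
-- ===== SOURCE A (Python) =====
-- from typing import Any, Protocol
--
-- def _compact_conversation_tail(messages: list[dict[str, Any]]) -> list[dict[str, Any]]:
--     if len(messages) <= 8:
--         return messages
--     assistant_indices = [index for index, message in enumerate(messages) if message.get("role") == "assistant"]
--     if not assistant_indices:
--         return messages[-8:]
--
--     keep_from = assistant_indices[max(len(assistant_indices) - 4, 0)]
--     tail = messages[keep_from:]
--     if len(tail) <= 8:
--         return tail
--     return tail[-8:]
-- ===== SOURCE B (Python) =====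
-- def _compact_conversation_tail(messages):
--     if len(messages) <= 8:
--         return messages
--     count = 0
--     keep_from = -1
--     for i in range(len(messages) - 1, -1, -1):
--         if messages[i].get("role") == "assistant":
--             count += 1
--             keep_from = i
--             if count == 4:
--                 break
--     if count == 0:
--         return messages[-8:]
--     tail = messages[keep_from:]
--     return tail if len(tail) <= 8 else tail[-8:]
-- ===== Notes on version B (the rewrite author's own statement) =====
-- stated objective: alternative
-- what changed: Replaces the full enumerate-and-filter pass building the complete list of assistant indices with a single backward scan that counts assistant messages and stops as soon as the fourth-from-last is found (remembering the smallest index seen for the fewer-than-four case).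
import Mathlib
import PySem

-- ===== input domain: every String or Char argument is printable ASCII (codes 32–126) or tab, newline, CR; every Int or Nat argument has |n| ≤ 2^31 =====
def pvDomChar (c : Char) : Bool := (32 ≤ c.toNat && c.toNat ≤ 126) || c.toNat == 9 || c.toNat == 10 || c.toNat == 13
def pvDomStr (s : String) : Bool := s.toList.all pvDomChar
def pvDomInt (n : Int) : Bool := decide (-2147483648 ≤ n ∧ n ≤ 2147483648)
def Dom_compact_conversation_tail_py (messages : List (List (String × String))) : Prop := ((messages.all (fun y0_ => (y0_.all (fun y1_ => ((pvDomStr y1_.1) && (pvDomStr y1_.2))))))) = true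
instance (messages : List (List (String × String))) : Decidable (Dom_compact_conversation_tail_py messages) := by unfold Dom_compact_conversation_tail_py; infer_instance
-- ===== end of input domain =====

-- B replaces A's full enumerate-and-filter pass (which builds every assistant index) by a
-- single backward scan that counts assistant messages and stops at the fourth-from-last;
-- objective: alternative (same cost, different traversal).

-- ===== PORT A =====
-- message.get("role") == "assistant"  (dict lookup = first match)
def pvIsAssistant (m : List (String × String)) : Bool :=
  (PySem.Dict.mk m).get? "role" == some "assistant"

def compact_conversation_tail_py (messages : List (List (String × String))) : List (List (String × String)) :=
  if messages.length ≤ 8 then messages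
  else
    let assistant_indices :=
      ((PySem.List.enumerate messages).filter (fun p => pvIsAssistant p.2)).map (fun p => p.1)
    if assistant_indices = [] then PySem.List.slice messages (some (-8)) none
    else
      let keep_from := PySem.List.pyGetD assistant_indices (max ((assistant_indices.length : Int) - 4) 0) 0
      let tail := PySem.List.slice messages (some keep_from) none
      if tail.length ≤ 8 then tail
      else PySem.List.slice tail (some (-8)) none

-- ===== PORT B =====
-- the backward counting loop of Source B: i runs len-1 … 0, stops when the 4th assistant is seen
def pvScanBack (messages : List (List (String × String))) : Nat → Nat → Int → Nat × Int
  | 0, count, keep => (count, keep)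
  | i + 1, count, keep =>
    if pvIsAssistant (messages.getD i []) then
      if count + 1 = 4 then (4, (i : Int))
      else pvScanBack messages i (count + 1) (i : Int)
    else pvScanBack messages i count keep

def compact_conversation_tail_py_alt (messages : List (List (String × String))) : List (List (String × String)) :=
  if messages.length ≤ 8 then messages
  else
    let r := pvScanBack messages messages.length 0 (-1)
    if r.1 = 0 then PySem.List.slice messages (some (-8)) none
    else
      let tail := PySem.List.slice messages (some r.2) none
      if tail.length ≤ 8 then tail
      else PySem.List.slice tail (some (-8)) none

-- ===== PRECONDITION & SPEC =====
def Spec_compact_conversation_tail_py (messages : List (List (String × String))) (out : List (List (String × String))) : Prop := out = compact_conversation_tail_py_alt messages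
instance (messages : List (List (String × String))) (out : List (List (String × String))) : Decidable (Spec_compact_conversation_tail_py messages out) := by unfold Spec_compact_conversation_tail_py; infer_instance

-- ===== CLAIM (what is proved, stated in full; the proofs are below) =====
def Claim_equal_compact_conversation_tail_py : Prop := ∀ (messages : List (List (String × String))), Dom_compact_conversation_tail_py messages → Spec_compact_conversation_tail_py messages (compact_conversation_tail_py messages)

-- ===== LEMMAS AND PROOFS =====

-- the (natural-number) indices of the assistant messages, counting from s
def pvIdxFrom : List (List (String × String)) → Nat → List Nat
  | [], _ => []
  | m :: ms, s => if pvIsAssistant m then s :: pvIdxFrom ms (s + 1) else pvIdxFrom ms (s + 1)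

theorem pvIdxFrom_append (ms : List (List (String × String))) (m : List (String × String)) (s : Nat) :
    pvIdxFrom (ms ++ [m]) s =
      pvIdxFrom ms s ++ (if pvIsAssistant m then [s + ms.length] else []) := by
  induction ms generalizing s with
  | nil => simp [pvIdxFrom]
  | cons a as ih =>
      simp only [List.cons_append, pvIdxFrom, ih, List.length_cons]
      split_ifs <;> simp <;> ring_nf

theorem pvEnum_filter (ms : List (List (String × String))) (s : Nat) :
    ((PySem.List.enumerate ms (s : Int)).filter (fun p => pvIsAssistant p.2)).map (fun p => p.1)
      = (pvIdxFrom ms s).map (fun j => Int.ofNat j) := by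
  induction ms generalizing s with
  | nil => simp [PySem.List.enumerate_nil, pvIdxFrom]
  | cons m msTl ih =>
      have hcast : ((s : Int) + 1) = ((s + 1 : Nat) : Int) := by push_cast; ring
      have ih' := ih (s + 1)
      rw [← hcast] at ih'
      rw [PySem.List.enumerate_cons]
      simp only [pvIdxFrom]
      by_cases h : pvIsAssistant m
      · rw [if_pos h, List.filter_cons_of_pos (by simpa using h), List.map_cons, ih']
        simp
      · rw [if_neg h, List.filter_cons_of_neg (by simpa using h), ih']

theorem pvScanBack_append (ms : List (List (String × String))) (m : List (String × String)) :
    ∀ i c k, i ≤ ms.length → pvScanBack (ms ++ [m]) i c k = pvScanBack ms i c k := by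
  intro i
  induction i with
  | zero => intro c k _; rfl
  | succ j ih =>
      intro c k hle
      have hj : j < ms.length := by omega
      have hg : (ms ++ [m]).getD j [] = ms.getD j [] := by
        simp [List.getD, List.getElem?_append_left hj]
      simp only [pvScanBack, hg]
      split_ifs <;> first | rfl | exact ih _ _ (by omega)

theorem pvScanBack_spec (ms : List (List (String × String))) :
    ∀ c k, c < 4 →
      pvScanBack ms ms.length c k =
        (if 4 ≤ (pvIdxFrom ms 0).length + c
         then (4, ((pvIdxFrom ms 0).getD ((pvIdxFrom ms 0).length - (4 - c)) 0 : Int))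
         else (c + (pvIdxFrom ms 0).length,
               if pvIdxFrom ms 0 = [] then k else ((pvIdxFrom ms 0).headD 0 : Int))) := by
  induction ms using List.reverseRecOn with
  | nil =>
      intro c k hc
      simp only [List.length_nil, pvScanBack, pvIdxFrom]
      rw [if_neg (by simp; omega)]
      simp
  | append_singleton ms m ih =>
      intro c k hc
      have hg : (ms ++ [m]).getD ms.length [] = m := by
        simp [List.getD]
      have hlen : (ms ++ [m]).length = ms.length + 1 := by simp
      rw [hlen]
      simp only [pvScanBack, hg]
      rw [pvIdxFrom_append]
      have hL : (pvIdxFrom ms 0 ++ [0 + ms.length]).length = (pvIdxFrom ms 0).length + 1 := by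
        simp
      by_cases hm : pvIsAssistant m
      · rw [if_pos hm, if_pos hm]
        by_cases h4 : c + 1 = 4
        · rw [if_pos h4, if_pos (by rw [hL]; omega)]
          have hidx : (pvIdxFrom ms 0 ++ [0 + ms.length]).length - (4 - c) = (pvIdxFrom ms 0).length := by
            rw [hL]; omega
          rw [hidx, List.getD_append_right _ _ _ _ (Nat.le_refl _)]
          simp
        · rw [if_neg h4, pvScanBack_append ms m ms.length (c + 1) (ms.length : Int) (Nat.le_refl _),
              ih (c + 1) (ms.length : Int) (by omega)]
          by_cases hge : 4 ≤ (pvIdxFrom ms 0).length + (c + 1)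
          · rw [if_pos hge, if_pos (by rw [hL]; omega)]
            have hidx : (pvIdxFrom ms 0 ++ [0 + ms.length]).length - (4 - c)
                = (pvIdxFrom ms 0).length - (4 - (c + 1)) := by rw [hL]; omega
            rw [hidx, List.getD_append _ _ _ _ (by omega)]
          · rw [if_neg hge]
            have hX : ¬ 4 ≤ (pvIdxFrom ms 0 ++ [0 + ms.length]).length + c := by rw [hL]; omega
            have hY : ¬ (pvIdxFrom ms 0 ++ [0 + ms.length] = []) := by simp
            rw [if_neg hX, if_neg hY]
            by_cases hemp : pvIdxFrom ms 0 = []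
            · rw [if_pos hemp, hemp]
              simp
            · rw [if_neg hemp]
              obtain ⟨a, as, heq⟩ := List.exists_cons_of_ne_nil hemp
              rw [heq]
              refine Prod.ext (by simp; omega) (by simp)
      · rw [if_neg hm, if_neg hm, List.append_nil,
            pvScanBack_append ms m ms.length c k (Nat.le_refl _)]
        exact ih c k hc

theorem pvGetD_map_cast (I : List Nat) (t : Nat) :
    (I.map (fun j => Int.ofNat j)).getD t 0 = Int.ofNat (I.getD t 0) := by
  by_cases h : t < I.length
  · rw [List.getD_eq_getElem _ _ (by simpa using h), List.getD_eq_getElem _ _ h]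
    simp
  · rw [List.getD_eq_default _ _ (by simpa using h), List.getD_eq_default _ _ (by omega)]
    simp

-- ===== VERDICT (by name: the statement is the Claim_ definition above) =====
theorem compact_conversation_tail_py_spec : Claim_equal_compact_conversation_tail_py := by
  intro messages _
  unfold Spec_compact_conversation_tail_py compact_conversation_tail_py compact_conversation_tail_py_alt
  by_cases h8 : messages.length ≤ 8
  · simp [h8]
  · rw [if_neg h8, if_neg h8]
    have henum := pvEnum_filter messages 0
    have hscan := pvScanBack_spec messages 0 (-1) (by omega)
    set I := pvIdxFrom messages 0 with hI
    simp only [Nat.cast_zero] at henum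
    simp only [henum, hscan]
    by_cases hemp : I = []
    · simp [hemp]
    · rw [if_neg (by simp [hemp])]
      have hIlen : (I.map (fun j => Int.ofNat j)).length = I.length := by simp
      by_cases hge : 4 ≤ I.length + 0
      · rw [if_pos hge]
        have hne4 : ¬ ((4 : Nat) = 0) := by omega
        rw [if_neg hne4]
        have hmax : max ((((I.map (fun j => Int.ofNat j)).length : Int)) - 4) 0 = ((I.length - 4 : Nat) : Int) := by
          rw [hIlen]; omega
        rw [hmax, PySem.List.pyGetD_natCast, pvGetD_map_cast]
        have h40 : (4 : Nat) - 0 = 4 := rfl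
        rw [h40]
        rfl
      · rw [if_neg hge]
        have hne0 : ¬ (0 + I.length = 0) := by
          have := List.length_pos_of_ne_nil hemp; omega
        rw [if_neg hne0, if_neg hemp]
        have hmax : max ((((I.map (fun j => Int.ofNat j)).length : Int)) - 4) 0 = ((0 : Nat) : Int) := by
          rw [hIlen]; omega
        rw [hmax, PySem.List.pyGetD_natCast, pvGetD_map_cast]
        obtain ⟨a, as, heq⟩ := List.exists_cons_of_ne_nil hemp
        rw [heq]
        rfl
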